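-- pv_equiv track=rewrite | github.com/liskos/artemsaveliev | варианты/чайкин/5/ответы/5.py | f
-- ===== SOURCE A (Python) =====
-- def f(n):
--     b = bin(n)[2:]
--     if b[1::2].count("0") > b[1::2].count("1"):
--         b1 = b.replace("1","2")
--         b1 = b1.replace("0","1")
--         b1 = b1.replace("2", "0")
--     else:
--         b1 = ""
--         for i in range(len(b)):
--             if i % 2 == 1:
--                 b1 += "1"
--             else:
--                 b1 += b[i]
--     return int(b1, 2)
-- ===== SOURCE B (Python) =====
-- def f(n):
--     L = max(n.bit_length(), 1)
--     zeros = 0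
--     ones = 0
--     for i in range(1, L, 2):
--         if (n >> (L - 1 - i)) & 1:
--             ones += 1
--         else:
--             zeros += 1
--     if zeros > ones:
--         return ((1 << L) - 1) - n
--     add = 0
--     for i in range(1, L, 2):
--         if (n >> (L - 1 - i)) & 1 == 0:
--             add += 1 << (L - 1 - i)
--     return n + add
-- ===== Notes on version B (the rewrite author's own statement) =====
-- stated objective: alternative
-- what changed: B replaces all string manipulation (bin(), slicing, str.count, chained replace, character-append loop, int(.,2)) with integer bit arithmetic: it counts the bits at odd positions with shifts, and produces the result as ((1<<L)-1)-n (flip all bits) or n plus a sum of powers of two (force odd-position bits to 1).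
import Mathlib
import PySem

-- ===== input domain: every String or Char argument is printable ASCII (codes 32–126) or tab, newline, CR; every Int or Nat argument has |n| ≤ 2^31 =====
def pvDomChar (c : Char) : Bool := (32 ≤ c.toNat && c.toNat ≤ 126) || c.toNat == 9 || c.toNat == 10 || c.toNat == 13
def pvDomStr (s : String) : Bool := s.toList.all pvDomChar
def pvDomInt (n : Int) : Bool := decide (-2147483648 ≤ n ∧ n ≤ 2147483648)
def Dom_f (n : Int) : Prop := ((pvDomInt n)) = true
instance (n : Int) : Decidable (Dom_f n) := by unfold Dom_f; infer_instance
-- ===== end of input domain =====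

-- B replaces A's string manipulation by integer bit arithmetic (alternative algorithm, same return value).

-- ===== PORT A =====
-- int(b1, 2): PySem.Int.ofCharsBase?'s digit helpers are private (no structural reasoning is possible
-- through them), so it is ported by hand as the base-2 fold, which is exactly what int(s, 2) computes on
-- the strings A feeds it here: under Pre_f (0 ≤ n), b1 is always a nonempty list of '0'/'1' characters.
def pyIntBase2 (cs : List Char) : Int :=
  cs.foldl (fun a c => 2 * a + (if c = '1' then 1 else 0)) 0

def f (n : Int) : Int :=
  -- b = bin(n)[2:]
  let b : List Char := PySem.List.slice (PySem.Int.toBinChars0b n) (some 2) none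
  -- b[1::2]  (step 2 ≠ 0, so slice? is never none)
  let odd : List Char := (PySem.List.slice? b (some 1) none 2).getD []
  if PySem.Chars.count odd ['0'] > PySem.Chars.count odd ['1'] then
    let b1 := PySem.Chars.replace b ['1'] ['2']
    let b2 := PySem.Chars.replace b1 ['0'] ['1']
    let b3 := PySem.Chars.replace b2 ['2'] ['0']
    pyIntBase2 b3
  else
    let b1 := (PySem.List.pyRange 0 (PySem.List.len b) 1).foldl
      (fun acc i => acc ++ [if PySem.Int.mod i 2 = 1 then '1' else PySem.List.pyGetD b i ' ']) []
    pyIntBase2 b1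

-- ===== PORT B =====
-- B is used under Pre_f (0 ≤ n): its Python int arithmetic is ported on m = n.toNat, exact there
-- (the shift amounts L-1-i are the same Nat values, since 1 ≤ i ≤ L-1 in both loops).
def f_alt (n : Int) : Int :=
  let m : Nat := n.toNat
  let L : Nat := max (PySem.Int.bitLength n) 1
  let zo : Int × Int := (PySem.List.pyRange 1 (L : Int) 2).foldl
      (fun p i => if (m >>> (L - 1 - i.toNat)) &&& 1 ≠ 0 then (p.1, p.2 + 1) else (p.1 + 1, p.2))
      (0, 0)
  if zo.1 > zo.2 then
    (((1 <<< L) - 1 : Nat) : Int) - n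
  else
    let add : Int := (PySem.List.pyRange 1 (L : Int) 2).foldl
      (fun acc i => if (m >>> (L - 1 - i.toNat)) &&& 1 = 0 then
          acc + (((1 <<< (L - 1 - i.toNat)) : Nat) : Int) else acc) 0
    n + add

-- ===== PRECONDITION & SPEC =====
-- A raises ValueError exactly for n < 0 (bin(n)[2:] = 'b…' is rejected by int(., 2)); Pre_f excludes those.
def Pre_f (n : Int) : Prop := 0 ≤ n
instance (n : Int) : Decidable (Pre_f n) := by unfold Pre_f; infer_instance
def pvWitness_f : Int := 6

def Spec_f (n : Int) (out : Int) : Prop := out = f_alt n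
instance (n : Int) (out : Int) : Decidable (Spec_f n out) := by unfold Spec_f; infer_instance

-- ===== CLAIM (what is proved, stated in full; the proofs are below) =====
def Claim_equal_f : Prop := ∀ (n : Int), Dom_f n → Pre_f n → Spec_f n (f n)

-- ===== LEMMAS AND PROOFS =====

def binSpec (m : Nat) : List Char :=
  if _h : m < 2 then [Nat.digitChar m]
  else binSpec (m / 2) ++ [Nat.digitChar (m % 2)]
decreasing_by exact Nat.div_lt_self (by omega) (by omega)

theorem toDigitsCore_eq (fuel : Nat) : ∀ (m : Nat) (acc : List Char), m < fuel →
    Nat.toDigitsCore 2 fuel m acc = binSpec m ++ acc := by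
  induction fuel with
  | zero => omega
  | succ fuel ih =>
    intro m acc hm
    rw [Nat.toDigitsCore]
    by_cases h2 : m < 2
    · have : m / 2 = 0 := by omega
      rw [binSpec]
      simp [this, h2]
      congr 1
      omega
    · have hne : ¬ m / 2 = 0 := by omega
      simp only [hne, if_false]
      rw [ih (m / 2) _ (by omega)]
      conv_rhs => rw [binSpec]
      simp [h2]

theorem toDigits_eq (m : Nat) : Nat.toDigits 2 m = binSpec m := by
  rw [Nat.toDigits, toDigitsCore_eq (m+1) m [] (by omega), List.append_nil]

theorem binSpec_ne_nil (m : Nat) : binSpec m ≠ [] := by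
  rw [binSpec]; split <;> simp

theorem binSpec_chars (m : Nat) : ∀ c ∈ binSpec m, c = '0' ∨ c = '1' := by
  fun_induction binSpec with
  | case1 m h =>
    interval_cases m <;> simp [Nat.digitChar]
  | case2 m h ih =>
    intro c hc
    rcases List.mem_append.mp hc with h1 | h1
    · exact ih c h1
    · simp at h1
      subst h1
      have : m % 2 = 0 ∨ m % 2 = 1 := by omega
      rcases this with h' | h' <;> simp [h', Nat.digitChar]

theorem bl_pos (m : Nat) (h : 1 ≤ m) : 1 ≤ PySem.Int.bitLength (m : Int) := by
  rw [PySem.Int.bitLength_natCast (by omega)]; omega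

theorem binSpec_length (m : Nat) :
    (binSpec m).length = max (PySem.Int.bitLength (m : Int)) 1 := by
  fun_induction binSpec with
  | case1 m h =>
    interval_cases m
    · simp [PySem.Int.bitLength_zero]
    · rw [PySem.Int.bitLength_natCast (by omega)]
      norm_num [PySem.Int.bitLength_zero]
  | case2 m h ih =>
    have h2 : 1 ≤ m / 2 := by omega
    have := bl_pos (m / 2) h2
    rw [List.length_append, ih]
    conv_rhs => rw [PySem.Int.bitLength_natCast (show 0 < m by omega)]
    simp only [List.length_singleton]
    omega


theorem parse_from (cs : List Char) : ∀ (a : Int),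
    cs.foldl (fun a c => 2 * a + (if c = '1' then 1 else 0)) a
      = a * 2 ^ cs.length + pyIntBase2 cs := by
  induction cs with
  | nil => intro a; simp [pyIntBase2]
  | cons c t ih =>
    intro a
    simp only [List.foldl_cons, pyIntBase2] at *
    rw [ih (2 * a + _), ih (2 * 0 + _)]
    simp [List.length_cons, pow_succ]
    split_ifs <;> ring

theorem parse_cons (c : Char) (cs : List Char) :
    pyIntBase2 (c :: cs) = (if c = '1' then 1 else 0) * 2 ^ cs.length + pyIntBase2 cs := by
  rw [pyIntBase2, List.foldl_cons, parse_from]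
  ring_nf

theorem parse_append (cs : List Char) (c : Char) :
    pyIntBase2 (cs ++ [c]) = 2 * pyIntBase2 cs + (if c = '1' then 1 else 0) := by
  rw [pyIntBase2, List.foldl_append]
  simp [pyIntBase2]

theorem parse_binSpec (m : Nat) : pyIntBase2 (binSpec m) = m := by
  fun_induction binSpec with
  | case1 m h => interval_cases m <;> simp [pyIntBase2, Nat.digitChar]
  | case2 m h ih =>
    rw [parse_append, ih]
    have h2 : m % 2 = 0 ∨ m % 2 = 1 := by omega
    rcases h2 with h' | h' <;> simp [h', Nat.digitChar] <;> omega

theorem getD_binSpec (m : Nat) : ∀ k, k < (binSpec m).length →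
    (binSpec m).getD ((binSpec m).length - 1 - k) ' ' = Nat.digitChar ((m >>> k) % 2) := by
  fun_induction binSpec with
  | case1 m h =>
    intro k hk
    simp at hk
    subst hk
    simp
    congr 1
    omega
  | case2 m h ih =>
    intro k hk
    simp only [List.length_append, List.length_singleton] at hk ⊢
    rcases Nat.eq_zero_or_pos k with hk0 | hkp
    · subst hk0
      have hlen : (binSpec (m/2)).length + 1 - 1 - 0 = (binSpec (m/2)).length := by omega
      rw [hlen, List.getD_append_right _ _ _ _ (le_refl _)]
      simp
    · obtain ⟨k', rfl⟩ : ∃ k', k = k' + 1 := ⟨k - 1, by omega⟩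
      have hk' : k' < (binSpec (m/2)).length := by omega
      have hidx : (binSpec (m/2)).length + 1 - 1 - (k' + 1) = (binSpec (m/2)).length - 1 - k' := by omega
      rw [hidx, List.getD_append _ _ _ _ (by omega), ih k' hk']
      congr 2
      rw [Nat.add_comm k' 1, Nat.shiftRight_add, Nat.shiftRight_one]

theorem bin_slice (n : Int) (h : 0 ≤ n) :
    PySem.List.slice (PySem.Int.toBinChars0b n) (some 2) none = binSpec n.toNat := by
  rw [PySem.List.slice_from _ (a := 2) (by omega)]
  rw [PySem.Int.toBinChars0b]
  have : ¬ n < 0 := by omega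
  simp only [this, if_false]
  have h2 : ((2 : Int)).toNat = 2 := rfl
  rw [h2]
  simp only [List.drop_succ_cons, List.drop_zero]
  exact toDigits_eq n.toNat


theorem replace_go_singleton (c d : Char) : ∀ (fuel : Nat) (s acc : List Char), s.length ≤ fuel →
    PySem.Chars.replace.go [c] [d] fuel s acc
      = acc.reverse ++ s.map (fun x => if x = c then d else x) := by
  intro fuel
  induction fuel with
  | zero =>
    intro s acc h
    have : s = [] := by cases s <;> simp_all
    subst this
    simp [PySem.Chars.replace.go]
  | succ fuel ih =>
    intro s acc h
    cases s with
    | nil => simp [PySem.Chars.replace.go]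
    | cons x t =>
      rw [PySem.Chars.replace.go]
      by_cases hx : x = c
      · subst hx
        simp only [List.isPrefixOf, BEq.rfl, Bool.true_and, if_true,
          List.length_singleton, List.drop_succ_cons, List.drop_zero]
        rw [ih t _ (by simpa using h)]
        simp
      · have hpre : [c].isPrefixOf (x :: t) = false := by
          simp [List.isPrefixOf]
          exact fun hh => absurd hh.symm hx
        rw [hpre]
        simp only [Bool.false_eq_true, if_false]
        rw [ih t _ (by simpa using h)]
        simp [hx]

theorem replace_singleton (s : List Char) (c d : Char) :
    PySem.Chars.replace s [c] [d] = s.map (fun x => if x = c then d else x) := by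
  rw [PySem.Chars.replace]
  simp only [List.isEmpty_cons, Bool.false_eq_true, if_false]
  rw [replace_go_singleton c d s.length s [] (le_refl _)]
  simp

theorem count_go_singleton (c : Char) : ∀ (fuel : Nat) (s : List Char) (acc : Nat), s.length ≤ fuel →
    PySem.Chars.count.go [c] fuel s acc = acc + s.count c := by
  intro fuel
  induction fuel with
  | zero =>
    intro s acc h
    have : s = [] := by cases s <;> simp_all
    subst this
    simp [PySem.Chars.count.go]
  | succ fuel ih =>
    intro s acc h
    cases s with
    | nil => simp [PySem.Chars.count.go]
    | cons x t =>
      rw [PySem.Chars.count.go]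
      by_cases hx : x = c
      · subst hx
        simp only [List.isPrefixOf, BEq.rfl, Bool.true_and, if_true,
          List.length_singleton, List.drop_succ_cons, List.drop_zero]
        rw [ih t _ (by simpa using h)]
        simp
        omega
      · have hpre : [c].isPrefixOf (x :: t) = false := by
          simp [List.isPrefixOf]
          exact fun hh => absurd hh.symm hx
        rw [hpre]
        simp only [Bool.false_eq_true, if_false]
        rw [ih t _ (by simpa using h)]
        simp [hx]

theorem count_singleton (s : List Char) (c : Char) :
    PySem.Chars.count s [c] = s.count c := by
  rw [PySem.Chars.count]
  simp only [List.isEmpty_cons, Bool.false_eq_true, if_false]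
  rw [count_go_singleton c s.length s 0 (le_refl _)]
  omega

def flipc (c : Char) : Char := if c = '1' then '0' else '1'

theorem replace_chain (s : List Char) (h : ∀ c ∈ s, c = '0' ∨ c = '1') :
    PySem.Chars.replace (PySem.Chars.replace (PySem.Chars.replace s ['1'] ['2']) ['0'] ['1']) ['2'] ['0']
      = s.map flipc := by
  rw [replace_singleton, replace_singleton, replace_singleton, List.map_map, List.map_map]
  apply List.map_congr_left
  intro c hc
  rcases h c hc with h' | h' <;> subst h' <;> simp [flipc]

theorem parse_flip (s : List Char) (h : ∀ c ∈ s, c = '0' ∨ c = '1') :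
    pyIntBase2 (s.map flipc) + pyIntBase2 s = 2 ^ s.length - 1 := by
  induction s with
  | nil => simp [pyIntBase2]
  | cons c t ih =>
    have ht := ih (fun x hx => h x (List.mem_cons_of_mem _ hx))
    simp only [List.map_cons, parse_cons, List.length_map, List.length_cons]
    have hc : (if flipc c = '1' then (1:Int) else 0) + (if c = '1' then 1 else 0) = 1 := by
      rcases h c List.mem_cons_self with h' | h' <;> subst h' <;> simp [flipc]
    have hp : (0:Int) < 2 ^ t.length := by positivity
    rw [pow_succ]
    nlinarith [ht, hc, hp]


theorem slice_odd (bs : List Char) (h : 1 ≤ bs.length) :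
    (PySem.List.slice? bs (some 1) none 2).getD []
      = (List.range (bs.length / 2)).map (fun k => bs.getD (1 + 2 * k) ' ') := by
  rw [PySem.List.slice?]
  simp only [PySem.List.sliceIndices]
  norm_num
  have hmin : min (1:Int) (bs.length:Int) = 1 := by omega
  rw [hmin]
  have hcnt : (if 1 < bs.length then (((bs.length:Int) - 1 + 2 - 1) / 2).toNat else 0)
      = bs.length / 2 := by
    split_ifs with h2
    · have he : ((bs.length:Int) - 1 + 2 - 1) = (bs.length : Int) := by ring
      rw [he]
      omega
    · omega
  rw [hcnt]
  have hin : ∀ k ∈ List.range (bs.length / 2), bs[((1:Int) + 2 * (k:Int)).toNat]? = some (bs.getD (1 + 2 * k) ' ') := by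
    intro k hk
    simp only [List.mem_range] at hk
    have hidx : ((1:Int) + 2 * (k:Int)).toNat = 1 + 2 * k := by omega
    rw [hidx]
    have hlt : 1 + 2 * k < bs.length := by omega
    rw [List.getElem?_eq_getElem hlt, List.getD_eq_getElem _ _ hlt]
  rw [List.filterMap_congr (g := fun k : Nat => some (bs.getD (1 + 2 * k) ' ')) hin]
  simp

def oddify : List Char → List Char
  | [] => []
  | [c] => [c]
  | c :: _ :: t => c :: '1' :: oddify t

def addOf : List Char → Int
  | [] => 0
  | [_] => 0
  | _ :: d :: t => (if d = '0' then 2 ^ t.length else 0) + addOf t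

theorem oddify_length (s : List Char) : (oddify s).length = s.length := by
  fun_induction oddify <;> simp_all

theorem parse_oddify (s : List Char) (h : ∀ c ∈ s, c = '0' ∨ c = '1') :
    pyIntBase2 (oddify s) = pyIntBase2 s + addOf s := by
  fun_induction oddify with
  | case1 => simp [addOf]
  | case2 c => simp [addOf]
  | case3 c d t ih =>
    have hd : d = '0' ∨ d = '1' := h d (by simp)
    have ht := ih (fun x hx => h x (by simp [hx]))
    rw [addOf]
    simp only [parse_cons, List.length_cons, oddify_length]
    rcases hd with h' | h' <;> subst h' <;> simp at ht ⊢ <;> rw [ht] <;> ring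

theorem oddify_eq_map (s : List Char) :
    (List.range s.length).map (fun i => if i % 2 = 1 then '1' else s.getD i ' ') = oddify s := by
  fun_induction oddify with
  | case1 => simp
  | case2 c => simp
  | case3 c d t ih =>
    simp only [List.length_cons]
    rw [List.range_succ_eq_map, List.range_succ_eq_map]
    simp only [List.map_cons, List.map_map]
    refine (List.cons_eq_cons).mpr ⟨by simp, (List.cons_eq_cons).mpr ⟨by norm_num, ?_⟩⟩
    rw [← ih]
    apply List.map_congr_left
    intro i hi
    simp only [Function.comp, Nat.succ_eq_add_one]
    have e1 : (i + 1 + 1) % 2 = i % 2 := by omega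
    rw [e1]
    by_cases hp : i % 2 = 1
    · simp [hp]
    · simp [hp]

theorem addOf_eq_sum (s : List Char) :
    addOf s = ((List.range (s.length / 2)).map
      (fun k => if s.getD (1 + 2 * k) ' ' = '0' then ((2 : Int)) ^ (s.length - 2 - 2 * k) else 0)).sum := by
  fun_induction addOf with
  | case1 => simp
  | case2 c => simp
  | case3 c d t ih =>
    have hlen : (c :: d :: t).length / 2 = t.length / 2 + 1 := by simp; omega
    rw [hlen, List.range_succ_eq_map]
    simp only [List.map_cons, List.map_map, List.sum_cons]
    have h0 : (if (c :: d :: t).getD (1 + 2 * 0) ' ' = '0' then ((2:Int)) ^ ((c :: d :: t).length - 2 - 2 * 0) else 0)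
        = (if d = '0' then (2:Int) ^ t.length else 0) := by
      simp
    have htail : List.map ((fun k => if (c :: d :: t).getD (1 + 2 * k) ' ' = '0' then ((2:Int)) ^ ((c :: d :: t).length - 2 - 2 * k) else 0) ∘ Nat.succ) (List.range (t.length / 2))
        = List.map (fun k => if t.getD (1 + 2 * k) ' ' = '0' then ((2:Int)) ^ (t.length - 2 - 2 * k) else 0) (List.range (t.length / 2)) := by
      apply List.map_congr_left
      intro k hk
      simp only [Function.comp, Nat.succ_eq_add_one]
      have e1 : 1 + 2 * (k + 1) = (1 + 2 * k) + 1 + 1 := by omega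
      have e2 : (c :: d :: t).length - 2 - 2 * (k + 1) = t.length - 2 - 2 * k := by simp; omega
      rw [e1, e2]
      simp
    rw [h0, htail, ih]

theorem pair_fold {α : Type} (p : α → Prop) [DecidablePred p] (l : List α) : ∀ (a b : Int),
    l.foldl (fun q x => if p x then (q.1, q.2 + 1) else (q.1 + 1, q.2)) (a, b)
      = (a + l.countP (fun x => decide ¬ p x), b + l.countP (fun x => decide (p x))) := by
  induction l with
  | nil => intro a b; simp
  | cons x t ih =>
    intro a b
    simp only [List.foldl_cons, List.countP_cons]
    by_cases hx : p x
    · simp [hx, ih]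
      omega
    · simp [hx, ih]
      omega

theorem add_fold {α : Type} (p : α → Prop) [DecidablePred p] (w : α → Int) (l : List α) : ∀ (a : Int),
    l.foldl (fun acc x => if p x then acc + w x else acc) a
      = a + (l.map (fun x => if p x then w x else 0)).sum := by
  induction l with
  | nil => intro a; simp
  | cons x t ih =>
    intro a
    simp only [List.foldl_cons, List.map_cons, List.sum_cons]
    by_cases hx : p x
    · rw [if_pos hx, if_pos hx, ih]
      ring
    · rw [if_neg hx, if_neg hx, ih]
      ring

theorem digitChar_eq_zero_iff (b : Nat) (hb : b < 2) : (Nat.digitChar b = '0' ↔ b = 0) := by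
  interval_cases b <;> simp [Nat.digitChar]

theorem digitChar_eq_one_iff (b : Nat) (hb : b < 2) : (Nat.digitChar b = '1' ↔ b = 1) := by
  interval_cases b <;> simp [Nat.digitChar]

theorem main_eq (n : Int) (h0 : 0 ≤ n) : f n = f_alt n := by
  have hn : ((n.toNat : Nat) : Int) = n := Int.toNat_of_nonneg h0
  have hchars := binSpec_chars n.toNat
  have hL1 : 0 < (binSpec n.toNat).length := List.length_pos_iff.mpr (binSpec_ne_nil n.toNat)
  simp only [f, f_alt]
  rw [bin_slice _ h0]
  rw [slice_odd _ hL1, count_singleton, count_singleton]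
  rw [show max (PySem.Int.bitLength n) 1 = (binSpec n.toNat).length from by
    rw [binSpec_length n.toNat, hn]]
  rw [PySem.List.pyRange_of_pos 1 _ (by norm_num)]
  have hcnt : (if (1:Int) < (((binSpec n.toNat).length : Nat) : Int) then (((((binSpec n.toNat).length:Nat):Int) - 1 + 2 - 1) / 2).toNat else 0) = (binSpec n.toNat).length / 2 := by
    split_ifs with h2
    · have he : ((((binSpec n.toNat).length:Nat):Int) - 1 + 2 - 1) = (((binSpec n.toNat).length:Nat):Int) := by ring
      rw [he]
      omega
    · omega
  have hget : ∀ k, k < (binSpec n.toNat).length / 2 →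
      (binSpec n.toNat).getD (1 + 2 * k) ' ' = Nat.digitChar ((n.toNat >>> ((binSpec n.toNat).length - 2 - 2 * k)) % 2) := by
    intro k hk
    have h2 : (binSpec n.toNat).length - 2 - 2 * k < (binSpec n.toNat).length := by omega
    have hg := getD_binSpec n.toNat ((binSpec n.toNat).length - 2 - 2 * k) h2
    rw [show (binSpec n.toNat).length - 1 - ((binSpec n.toNat).length - 2 - 2 * k) = 1 + 2 * k by omega] at hg
    exact hg
  have hbit : ∀ k : Nat, (n.toNat >>> ((binSpec n.toNat).length - 2 - 2 * k)) % 2 < 2 :=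
    fun k => Nat.mod_lt _ (by norm_num)
  apply if_congr
  · -- the two branch conditions agree
    rw [List.count_eq_countP, List.count_eq_countP, List.countP_map, List.countP_map]
    rw [List.foldl_map,
      pair_fold (fun k : Nat => (n.toNat >>> ((binSpec n.toNat).length - 1 - ((1:Int) + 2 * (k:Int)).toNat)) &&& 1 ≠ 0)]
    simp only [zero_add]
    rw [gt_iff_lt, gt_iff_lt, ← Nat.cast_lt (α := Int)]
    have hc0 : List.countP ((fun x => x == '1') ∘ fun k => (binSpec n.toNat).getD (1 + 2 * k) ' ')
        (List.range ((binSpec n.toNat).length / 2))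
        = List.countP (fun k : Nat =>
            decide ((n.toNat >>> ((binSpec n.toNat).length - 1 - ((1:Int) + 2 * (k:Int)).toNat)) &&& 1 ≠ 0))
          (List.range (if (1:Int) < (((binSpec n.toNat).length : Nat) : Int) then (((((binSpec n.toNat).length:Nat):Int) - 1 + 2 - 1) / 2).toNat else 0)) := by
      rw [hcnt]
      apply List.countP_congr
      intro k hk
      simp only [List.mem_range] at hk
      rw [Function.comp_apply, hget k hk]
      have hidx : ((binSpec n.toNat).length - 1 - ((1:Int) + 2 * (k:Int)).toNat) = (binSpec n.toNat).length - 2 - 2 * k := by omega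
      rw [hidx, Nat.and_one_is_mod]
      simp only [beq_iff_eq, decide_eq_true_eq]
      rw [digitChar_eq_one_iff _ (hbit k)]
      have := hbit k
      omega
    have hc1 : List.countP ((fun x => x == '0') ∘ fun k => (binSpec n.toNat).getD (1 + 2 * k) ' ')
        (List.range ((binSpec n.toNat).length / 2))
        = List.countP (fun k : Nat =>
            decide (¬ (n.toNat >>> ((binSpec n.toNat).length - 1 - ((1:Int) + 2 * (k:Int)).toNat)) &&& 1 ≠ 0))
          (List.range (if (1:Int) < (((binSpec n.toNat).length : Nat) : Int) then (((((binSpec n.toNat).length:Nat):Int) - 1 + 2 - 1) / 2).toNat else 0)) := by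
      rw [hcnt]
      apply List.countP_congr
      intro k hk
      simp only [List.mem_range] at hk
      rw [Function.comp_apply, hget k hk]
      have hidx : ((binSpec n.toNat).length - 1 - ((1:Int) + 2 * (k:Int)).toNat) = (binSpec n.toNat).length - 2 - 2 * k := by omega
      rw [hidx, Nat.and_one_is_mod]
      simp only [beq_iff_eq, decide_eq_true_eq, not_not]
      rw [digitChar_eq_zero_iff _ (hbit k)]
    rw [hc0, hc1]
  · -- true branch: flipping every bit
    rw [replace_chain _ hchars]
    have hflip := parse_flip (binSpec n.toNat) hchars
    have hpm := parse_binSpec n.toNat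
    rw [Nat.one_shiftLeft, Nat.cast_sub Nat.one_le_two_pow]
    push_cast
    rw [hn] at hpm
    linarith
  · -- false branch: forcing the odd-position bits to 1
    rw [PySem.List.len_eq, PySem.List.pyRange_zero_nat,
        PySem.List.foldl_append_singleton_eq_map, List.nil_append, List.map_map]
    have hmapA : List.map ((fun i => if PySem.Int.mod i 2 = 1 then '1' else PySem.List.pyGetD (binSpec n.toNat) i ' ') ∘ (fun k : Nat => (k : Int)))
          (List.range (binSpec n.toNat).length)
        = List.map (fun i => if i % 2 = 1 then '1' else (binSpec n.toNat).getD i ' ') (List.range (binSpec n.toNat).length) := by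
      apply List.map_congr_left
      intro i _
      simp only [Function.comp_apply]
      have hcond : (PySem.Int.mod ((i : Nat) : Int) 2 = 1) ↔ (i % 2 = 1) := by
        rw [show ((2:Int)) = ((2:Nat):Int) by norm_num, PySem.Int.mod_natCast]
        omega
      simp only [hcond, PySem.List.pyGetD_natCast]
    rw [hmapA, oddify_eq_map, parse_oddify _ hchars, parse_binSpec, addOf_eq_sum]
    rw [List.foldl_map,
      add_fold (fun k : Nat => (n.toNat >>> ((binSpec n.toNat).length - 1 - ((1:Int) + 2 * (k:Int)).toNat)) &&& 1 = 0)
        (fun k : Nat => (((1 <<< ((binSpec n.toNat).length - 1 - ((1:Int) + 2 * (k:Int)).toNat)) : Nat) : Int))]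
    simp only [zero_add]
    have hmapB : List.map (fun k : Nat =>
          if (n.toNat >>> ((binSpec n.toNat).length - 1 - ((1:Int) + 2 * (k:Int)).toNat)) &&& 1 = 0 then
            (((1 <<< ((binSpec n.toNat).length - 1 - ((1:Int) + 2 * (k:Int)).toNat) : Nat) : Int)) else 0)
          (List.range (if (1:Int) < (((binSpec n.toNat).length : Nat) : Int) then (((((binSpec n.toNat).length:Nat):Int) - 1 + 2 - 1) / 2).toNat else 0))
        = List.map (fun k => if (binSpec n.toNat).getD (1 + 2 * k) ' ' = '0' then ((2 : Int)) ^ ((binSpec n.toNat).length - 2 - 2 * k) else 0)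
          (List.range ((binSpec n.toNat).length / 2)) := by
      rw [hcnt]
      apply List.map_congr_left
      intro k hk
      simp only [List.mem_range] at hk
      have hidx : ((binSpec n.toNat).length - 1 - ((1:Int) + 2 * (k:Int)).toNat) = (binSpec n.toNat).length - 2 - 2 * k := by omega
      rw [hidx, Nat.and_one_is_mod, hget k hk, Nat.one_shiftLeft]
      simp only [digitChar_eq_zero_iff _ (hbit k)]
      push_cast
      rfl
    rw [hmapB, hn]

-- ===== VERDICT (by name: the statement is the Claim_ definition above) =====
theorem f_spec : Claim_equal_f := by
  intro n _ hpre
  unfold Spec_f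
  exact main_eq n hpre
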